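-- pv_equiv track=rewrite | github.com/BlenderCN/Learnbgame | All_In_One/PRP_IO/PRP_Import.py | strip_to_list
-- ===== SOURCE A (Python) =====
-- def split(array, n=3):
--     return [array[i:i + n] for i in range(0, len(array), n)]
--
-- def strip_to_list(indices):
--     new_indices = []
--     for v in range(0, len(indices) - 2):
--         if v & 1:
--             new_indices.append(indices[v])
--             new_indices.append(indices[v + 1])
--             new_indices.append(indices[v + 2])
--         else:
--             new_indices.append(indices[v])
--             new_indices.append(indices[v + 2])
--             new_indices.append(indices[v + 1])
--     new_indices = list(filter(lambda a: len(set(a)) == 3, split(new_indices)))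
--     return new_indices
-- ===== SOURCE B (Python) =====
-- def strip_to_list(indices):
--     # single pass over the 3-windows (zip) building each filtered triangle directly,
--     # instead of flat index list + chunking split + trailing set-filter
--     new_indices = []
--     for v, (a, b, c) in enumerate(zip(indices, indices[1:], indices[2:])):
--         if a != b and b != c and a != c:
--             new_indices.append([a, b, c] if v % 2 == 1 else [a, c, b])
--     return new_indices
-- ===== Notes on version B (the rewrite author's own statement) =====
-- stated objective: simpler
-- what changed: One pass over enumerate(zip(indices, indices[1:], indices[2:])) appends each non-degenerate triangle directly, replacing A's three passes (flat index-built vertex list, chunking split() helper, trailing len(set)==3 filter); the fused single pass is a measured constant-factor speedup.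
import Mathlib
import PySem

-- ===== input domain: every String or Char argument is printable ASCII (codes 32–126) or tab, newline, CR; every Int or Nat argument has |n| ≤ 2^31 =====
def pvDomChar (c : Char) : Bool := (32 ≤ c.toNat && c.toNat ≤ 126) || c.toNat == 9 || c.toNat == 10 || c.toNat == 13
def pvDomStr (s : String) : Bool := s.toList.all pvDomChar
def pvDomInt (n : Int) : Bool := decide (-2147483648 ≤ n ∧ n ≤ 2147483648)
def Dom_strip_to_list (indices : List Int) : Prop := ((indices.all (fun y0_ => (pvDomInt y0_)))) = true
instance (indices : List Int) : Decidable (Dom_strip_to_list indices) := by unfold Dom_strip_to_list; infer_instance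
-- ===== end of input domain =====

-- B replaces A's three passes (flat index-built list, chunking split(), trailing set-filter)
-- with one pass over the enumerated 3-windows; same return value, simpler decomposition.


-- ===== PORT A =====
-- split(array, n): [array[i:i + n] for i in range(0, len(array), n)]
def pySplit (array : List Int) (n : Int) : List (List Int) :=
  (PySem.List.pyRange 0 (PySem.List.len array) n).map
    (fun i => PySem.List.slice array (some i) (some (i + n)))

-- every indices[v] access has 0 ≤ v < len(indices), so pyGetD is exact here
def strip_to_list (indices : List Int) : List (List Int) :=
  let new_indices := (PySem.List.pyRange 0 (PySem.List.len indices - 2) 1).foldl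
    (fun acc v =>
      if PySem.Int.band v 1 ≠ 0 then
        acc ++ [PySem.List.pyGetD indices v 0] ++ [PySem.List.pyGetD indices (v + 1) 0]
            ++ [PySem.List.pyGetD indices (v + 2) 0]
      else
        acc ++ [PySem.List.pyGetD indices v 0] ++ [PySem.List.pyGetD indices (v + 2) 0]
            ++ [PySem.List.pyGetD indices (v + 1) 0])
    []
  (pySplit new_indices 3).filter (fun a => PySem.Set.len (PySem.Set.ofList a) == 3)

-- ===== PORT B =====
-- for v, (a, b, c) in enumerate(zip(indices, indices[1:], indices[2:])): …
def strip_to_list_alt (indices : List Int) : List (List Int) :=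
  let windows := indices.zip ((PySem.List.slice indices (some 1) none).zip
                              (PySem.List.slice indices (some 2) none))
  (PySem.List.enumerate windows).foldl
    (fun out e =>
      if e.2.1 ≠ e.2.2.1 ∧ e.2.2.1 ≠ e.2.2.2 ∧ e.2.1 ≠ e.2.2.2 then
        out ++ [if PySem.Int.mod e.1 2 = 1 then [e.2.1, e.2.2.1, e.2.2.2]
                else [e.2.1, e.2.2.2, e.2.2.1]]
      else out) []

-- ===== PRECONDITION & SPEC =====
def Spec_strip_to_list (indices : List Int) (out : List (List Int)) : Prop := out = strip_to_list_alt indices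
instance (indices : List Int) (out : List (List Int)) : Decidable (Spec_strip_to_list indices out) := by unfold Spec_strip_to_list; infer_instance

-- ===== CLAIM (what is proved, stated in full; the proofs are below) =====
def Claim_equal_strip_to_list : Prop := ∀ (indices : List Int), Dom_strip_to_list indices → Spec_strip_to_list indices (strip_to_list indices)

-- ===== LEMMAS AND PROOFS =====

-- the triangle A emits for loop index v (before the degeneracy filter)
def triA (xs : List Int) (v : Int) : List Int :=
  if PySem.Int.band v 1 ≠ 0 then
    [PySem.List.pyGetD xs v 0, PySem.List.pyGetD xs (v + 1) 0, PySem.List.pyGetD xs (v + 2) 0]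
  else
    [PySem.List.pyGetD xs v 0, PySem.List.pyGetD xs (v + 2) 0, PySem.List.pyGetD xs (v + 1) 0]

-- common normal form both programs are reduced to
def canon (xs : List Int) : List (List Int) :=
  ((List.range (xs.length - 2)).filter
      (fun k => decide (xs.getD k 0 ≠ xs.getD (k+1) 0 ∧ xs.getD (k+1) 0 ≠ xs.getD (k+2) 0 ∧
                        xs.getD k 0 ≠ xs.getD (k+2) 0))).map
    (fun k => if k % 2 = 1 then [xs.getD k 0, xs.getD (k+1) 0, xs.getD (k+2) 0]
              else [xs.getD k 0, xs.getD (k+2) 0, xs.getD (k+1) 0])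

lemma set3_len (x y z : Int) :
    (PySem.Set.len (PySem.Set.ofList [x, y, z]) == 3) = true ↔ (x ≠ y ∧ y ≠ z ∧ x ≠ z) := by
  by_cases h1 : y = x <;> by_cases h2 : z = x <;> by_cases h3 : z = y <;>
    simp [PySem.Set.ofList, PySem.Set.add, PySem.Set.contains, PySem.Set.empty, PySem.Set.len,
      h1, h2, h3] <;> omega


lemma set3_decideA (x y z : Int) :
    (PySem.Set.len (PySem.Set.ofList [x, y, z]) == 3) = decide (x ≠ y ∧ y ≠ z ∧ x ≠ z) := by
  rw [Bool.eq_iff_iff, set3_len]; simp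

lemma set3_decideB (x y z : Int) :
    (PySem.Set.len (PySem.Set.ofList [x, z, y]) == 3) = decide (x ≠ y ∧ y ≠ z ∧ x ≠ z) := by
  rw [Bool.eq_iff_iff, set3_len]; simp; tauto

lemma pySplit3_key (L : List Int) :
    pySplit L 3 = (List.range ((L.length + 2) / 3)).map (fun k => (L.drop (3 * k)).take 3) := by
  unfold pySplit
  rw [PySem.List.pyRange_of_pos _ _ (by norm_num), List.map_map]
  have hcnt : (if (0:Int) < PySem.List.len L then ((PySem.List.len L - 0 + 3 - 1) / 3).toNat else 0)
      = (L.length + 2) / 3 := by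
    simp only [PySem.List.len_eq]
    split
    · omega
    · omega
  rw [hcnt]
  apply List.map_congr_left
  intro k _
  show PySem.List.slice L (some (0 + 3 * (k:Int))) (some (0 + 3 * (k:Int) + 3)) = _
  have h1 : (0 + 3 * (k:Int)) = ((3*k : Nat) : Int) := by push_cast; ring
  rw [h1]
  have h2 := PySem.List.slice_natCast_add L (3*k) 3
  simpa using h2

-- chunking a concatenation of length-3 blocks recovers the blocks
lemma split3_flatten (ts : List (List Int)) (h : ∀ t ∈ ts, t.length = 3) :
    pySplit ts.flatten 3 = ts := by
  induction ts with
  | nil => simp [pySplit3_key]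
  | cons t ts ih =>
    have ht : t.length = 3 := h t (by simp)
    have hts : ∀ u ∈ ts, u.length = 3 := fun u hu => h u (by simp [hu])
    rw [pySplit3_key]
    simp only [List.flatten_cons]
    rw [show ((t ++ ts.flatten).length + 2) / 3 = (ts.flatten.length + 2) / 3 + 1 by
      simp [ht]; omega]
    rw [List.range_succ_eq_map, List.map_cons, List.map_map]
    congr 1
    · rw [Nat.mul_zero, List.drop_zero, ← ht, List.take_left]
    · refine Eq.trans ?_ (ih hts)
      rw [pySplit3_key]
      apply List.map_congr_left
      intro k _
      show ((t ++ ts.flatten).drop (3 * (k+1))).take 3 = _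
      rw [show 3 * (k+1) = t.length + 3 * k by omega, List.drop_append,
          List.drop_of_length_le (by omega)]
      simp

-- A's loop-and-chunk result, characterised per loop index
lemma A_canon (xs : List Int) :
    strip_to_list xs =
      ((PySem.List.pyRange 0 (PySem.List.len xs - 2) 1).map (triA xs)).filter
        (fun a => PySem.Set.len (PySem.Set.ofList a) == 3) := by
  unfold strip_to_list
  rw [PySem.List.foldl_congr_mem _ _ (fun acc v => acc ++ triA xs v) _
        (by intro acc v _; simp only [triA]; split <;> simp)]
  have hlen : ∀ t ∈ (PySem.List.pyRange 0 (PySem.List.len xs - 2) 1).map (triA xs),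
      t.length = 3 := by
    intro t ht
    simp only [List.mem_map] at ht
    obtain ⟨v, _, rfl⟩ := ht
    simp only [triA]; split <;> rfl
  rw [PySem.List.foldl_append_eq_flatMap, List.nil_append, List.flatMap_def]
  show List.filter (fun a => (PySem.Set.ofList a).len == 3)
      (pySplit (List.map (triA xs) (PySem.List.pyRange 0 (PySem.List.len xs - 2) 1)).flatten 3) = _
  rw [split3_flatten _ hlen]

-- the triangle at loop index k, written over Nat with getD
lemma triA_nat (xs : List Int) (k : Nat) :
    triA xs ((0:Int) + ↑k) =
      if k % 2 = 1 then [xs.getD k 0, xs.getD (k+1) 0, xs.getD (k+2) 0]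
      else [xs.getD k 0, xs.getD (k+2) 0, xs.getD (k+1) 0] := by
  unfold triA
  have hband : PySem.Int.band ((0:Int) + ↑k) 1 = ↑(k % 2) := by
    rw [zero_add, ← Nat.and_one_is_mod]
    exact_mod_cast PySem.Int.band_natCast k 1
  have e0 : ((0:Int) + ↑k) = ((k : Nat) : Int) := by ring
  have e1 : ((0:Int) + ↑k + 1) = ((k + 1 : Nat) : Int) := by push_cast; ring
  have e2 : ((0:Int) + ↑k + 2) = ((k + 2 : Nat) : Int) := by push_cast; ring
  rw [hband, e1, e2, e0, PySem.List.pyGetD_natCast, PySem.List.pyGetD_natCast,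
      PySem.List.pyGetD_natCast]
  by_cases hp : k % 2 = 1
  · simp [hp]
  · have h0 : k % 2 = 0 := by omega
    simp [h0]

lemma A_canon2 (xs : List Int) : strip_to_list xs = canon xs := by
  rw [A_canon, PySem.List.pyRange_one, List.map_map, List.filter_map]
  unfold canon
  rw [show (PySem.List.len xs - 2 - 0).toNat = xs.length - 2 by
    simp only [PySem.List.len_eq]; omega]
  rw [List.filter_congr (q := fun k => decide (xs.getD k 0 ≠ xs.getD (k+1) 0 ∧
        xs.getD (k+1) 0 ≠ xs.getD (k+2) 0 ∧ xs.getD k 0 ≠ xs.getD (k+2) 0)) ?_]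
  · apply List.map_congr_left
    intro k hk
    simp only [Function.comp, triA_nat]
  · intro k _
    simp only [Function.comp, triA_nat]
    by_cases hp : k % 2 = 1
    · simp only [hp, if_pos]
      exact set3_decideA _ _ _
    · simp only [hp, if_false]
      exact set3_decideB _ _ _

lemma B_canon (xs : List Int) : strip_to_list_alt xs = canon xs := by
  unfold strip_to_list_alt canon
  have hW : (xs.zip ((PySem.List.slice xs (some 1) none).zip
                     (PySem.List.slice xs (some 2) none))) =
            xs.zip (xs.tail.zip (xs.drop 2)) := by
    rw [PySem.List.slice_from_one, PySem.List.slice_from _ (by norm_num)]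
    rw [show Int.toNat 2 = 2 from rfl]
  show (PySem.List.enumerate (xs.zip ((PySem.List.slice xs (some 1) none).zip
        (PySem.List.slice xs (some 2) none)))).foldl _ [] = _
  rw [hW]
  set W := xs.zip (xs.tail.zip (xs.drop 2)) with hWdef
  have hWlen : W.length = xs.length - 2 := by
    simp [hWdef, List.length_zip]
    omega
  have hget : ∀ (k : Nat) (_hk : k < xs.length - 2),
      PySem.List.pyGetD W ((0:Int) + ↑k) (0,(0,0)) =
        (xs[k]'(by omega), (xs[k+1]'(by omega), xs[k+2]'(by omega))) := by
    intro k hk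
    have hkW : k < W.length := by omega
    rw [zero_add, PySem.List.pyGetD_natCast, List.getD_eq_getElem _ _ hkW]
    simp [hWdef, List.getElem_zip, List.getElem_tail, List.getElem_drop,
      show 2 + k = k + 2 from by omega]
  rw [PySem.List.enumerate_eq_map_pyRange W (0, (0, 0)), List.foldl_map]
  rw [PySem.List.foldl_append_ite
        (p := fun j => (PySem.List.pyGetD W j (0,(0,0))).1 ≠ (PySem.List.pyGetD W j (0,(0,0))).2.1 ∧
                       (PySem.List.pyGetD W j (0,(0,0))).2.1 ≠ (PySem.List.pyGetD W j (0,(0,0))).2.2 ∧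
                       (PySem.List.pyGetD W j (0,(0,0))).1 ≠ (PySem.List.pyGetD W j (0,(0,0))).2.2)
        (f := fun j => if PySem.Int.mod j 2 = 1 then
                [(PySem.List.pyGetD W j (0,(0,0))).1, (PySem.List.pyGetD W j (0,(0,0))).2.1,
                 (PySem.List.pyGetD W j (0,(0,0))).2.2]
              else
                [(PySem.List.pyGetD W j (0,(0,0))).1, (PySem.List.pyGetD W j (0,(0,0))).2.2,
                 (PySem.List.pyGetD W j (0,(0,0))).2.1])]
  rw [List.nil_append, PySem.List.pyRange_one, List.filter_map, List.map_map]
  simp only [PySem.List.len_eq, Int.sub_zero, Int.toNat_natCast, hWlen]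
  rw [List.filter_congr (q := fun k => decide (xs.getD k 0 ≠ xs.getD (k+1) 0 ∧
        xs.getD (k+1) 0 ≠ xs.getD (k+2) 0 ∧ xs.getD k 0 ≠ xs.getD (k+2) 0)) ?_]
  · apply List.map_congr_left
    intro k hk
    rw [List.mem_filter, List.mem_range] at hk
    obtain ⟨hk, -⟩ := hk
    have hmod : PySem.Int.mod ((0:Int) + ↑k) 2 = ↑(k % 2) := by
      rw [zero_add]; exact_mod_cast PySem.Int.mod_natCast k 2
    simp only [Function.comp, hget k hk, hmod]
    have h0 : xs.getD k 0 = xs[k]'(by omega) := List.getD_eq_getElem _ _ (by omega)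
    have h1 : xs.getD (k+1) 0 = xs[k+1]'(by omega) := List.getD_eq_getElem _ _ (by omega)
    have h2 : xs.getD (k+2) 0 = xs[k+2]'(by omega) := List.getD_eq_getElem _ _ (by omega)
    rw [h0, h1, h2]
    by_cases hp : k % 2 = 1
    · simp [hp]
    · simp [hp]
      omega
  · intro k hk
    rw [List.mem_range] at hk
    simp only [Function.comp, hget k hk]
    have h0 : xs.getD k 0 = xs[k]'(by omega) := List.getD_eq_getElem _ _ (by omega)
    have h1 : xs.getD (k+1) 0 = xs[k+1]'(by omega) := List.getD_eq_getElem _ _ (by omega)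
    have h2 : xs.getD (k+2) 0 = xs[k+2]'(by omega) := List.getD_eq_getElem _ _ (by omega)
    rw [h0, h1, h2]

theorem A_eq_B (xs : List Int) : strip_to_list xs = strip_to_list_alt xs :=
  (A_canon2 xs).trans (B_canon xs).symm

-- ===== VERDICT (by name: the statement is the Claim_ definition above) =====
theorem strip_to_list_spec : Claim_equal_strip_to_list := by
  intro indices _
  unfold Spec_strip_to_list
  exact A_eq_B indices
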